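-- pv_equiv track=rewrite | github.com/CatEatSad/hungnk | ptit-zero-width/ptit-zero-width/zerowidth.py | hide_zero_width
-- ===== SOURCE A (Python) =====
-- def text_to_bits(text: str, encoding='utf-8', errors='surrogatepass') -> str:
--     data = text.encode(encoding, errors)
--     return ''.join(f"{byte:08b}" for byte in data)
--
-- def hide_zero_width(cover_text: str, secret: str) -> str:
--     bits = text_to_bits(secret)
--     zw = '\u200b'
--     result = []
--     bit_idx = 0
--
--     for ch in cover_text:
--         if ch == ' ' and bit_idx < len(bits):
--             b = bits[bit_idx]
--             if b == '0':
--                 result.append(' ' + zw)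
--             else:
--                 result.append(zw + ' ')
--             bit_idx += 1
--         else:
--             result.append(ch)
--
--     if bit_idx < len(bits):
--         raise ValueError("Cover text không đủ số dấu cách để giấu hết thông điệp.")
--
--     return ''.join(result)
-- ===== SOURCE B (Python) =====
-- def text_to_bits(text: str, encoding='utf-8', errors='surrogatepass') -> str:
--     data = text.encode(encoding, errors)
--     return ''.join(f"{byte:08b}" for byte in data)
--
-- def hide_zero_width(cover_text: str, secret: str) -> str:
--     bits = text_to_bits(secret)
--     zw = '\u200b'
--     parts = cover_text.split(' ')
--     if len(parts) - 1 < len(bits):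
--         raise ValueError("Cover text không đủ số dấu cách để giấu hết thông điệp.")
--     out = parts[0]
--     rest = bits
--     for part in parts[1:]:
--         if rest:
--             b, rest = rest[0], rest[1:]
--             out += (' ' + zw if b == '0' else zw + ' ') + part
--         else:
--             out += ' ' + part
--     return out
-- ===== Notes on version B (the rewrite author's own statement) =====
-- stated objective: alternative
-- what changed: B splits the cover text on single spaces once and rejoins the tokens with per-gap separators chosen from the bit stream (checking capacity up front), instead of A's character-by-character scan with a running bit index.
import Mathlib
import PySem

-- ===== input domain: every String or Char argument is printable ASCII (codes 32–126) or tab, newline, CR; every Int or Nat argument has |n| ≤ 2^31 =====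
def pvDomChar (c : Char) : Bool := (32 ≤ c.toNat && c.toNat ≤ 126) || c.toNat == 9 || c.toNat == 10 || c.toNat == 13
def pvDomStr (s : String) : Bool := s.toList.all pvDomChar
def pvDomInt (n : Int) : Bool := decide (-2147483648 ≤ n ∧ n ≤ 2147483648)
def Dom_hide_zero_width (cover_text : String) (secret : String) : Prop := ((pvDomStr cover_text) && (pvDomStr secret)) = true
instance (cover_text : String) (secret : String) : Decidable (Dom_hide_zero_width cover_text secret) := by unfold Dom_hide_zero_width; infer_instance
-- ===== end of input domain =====

-- B rebuilds the stego text by splitting the cover on single spaces and rejoining tokens with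
-- per-gap separators drawn from the bit stream, instead of A's char-by-char scan with a bit index.


-- ===== PORT A =====
-- the zero-width space '\u200b'
def zwChar : Char := Char.ofNat 0x200B

-- port of f"{byte:08b}": the 8 binary digits of the byte, MSB first (exact for 0 ≤ n < 256,
-- which holds for the UTF-8 bytes of the ASCII strings of Dom)
def byteBits (n : Nat) : List Char :=
  [if n / 128 % 2 = 1 then '1' else '0',
   if n / 64 % 2 = 1 then '1' else '0',
   if n / 32 % 2 = 1 then '1' else '0',
   if n / 16 % 2 = 1 then '1' else '0',
   if n / 8 % 2 = 1 then '1' else '0',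
   if n / 4 % 2 = 1 then '1' else '0',
   if n / 2 % 2 = 1 then '1' else '0',
   if n % 2 = 1 then '1' else '0']

-- port of text_to_bits (module helper used verbatim by both A and B); text.encode('utf-8') is
-- the list of char codes on the ASCII domain (exact there)
def text_to_bits (text : String) : List Char :=
  (text.toList.map (fun c => c.toNat)).flatMap byteBits

def hide_zero_width (cover_text : String) (secret : String) : String :=
  let bits := text_to_bits secret
  let st := cover_text.toList.foldl
    (fun (st : List (List Char) × Nat) ch =>
      if ch = ' ' ∧ st.2 < bits.length then
        let b := bits.getD st.2 ' '
        ((if b = '0' then [' ', zwChar] else [zwChar, ' ']) :: st.1, st.2 + 1)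
      else ([ch] :: st.1, st.2))
    ([], 0)
  -- Python raises ValueError here when st.2 < bits.length; those inputs are excluded by Pre_
  String.ofList st.1.reverse.flatten

-- ===== PORT B =====
-- Source B's rejoin loop: walk the split tokens, consuming one bit per gap while bits remain
def joinB : List (List Char) → List Char → List Char
  | [], _ => []
  | p :: ps, [] => ' ' :: (p ++ joinB ps [])
  | p :: ps, b :: bs => (if b = '0' then [' ', zwChar] else [zwChar, ' ']) ++ p ++ joinB ps bs

def hide_zero_width_alt (cover_text : String) (secret : String) : String :=
  let bits := text_to_bits secret
  let parts := PySem.Chars.splitOn cover_text.toList [' ']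
  -- Source B raises ValueError when parts.length - 1 < bits.length; those inputs are excluded by Pre_
  String.ofList (parts.headD [] ++ joinB parts.tail bits)

-- ===== PRECONDITION & SPEC =====
-- Pre_ excludes exactly the inputs on which A (and B alike) raises ValueError: covers with
-- fewer spaces than the secret has bits (8 per ASCII character).
def Pre_hide_zero_width (cover_text : String) (secret : String) : Prop :=
  8 * secret.toList.length ≤ cover_text.toList.count ' '
instance (cover_text : String) (secret : String) : Decidable (Pre_hide_zero_width cover_text secret) := by
  unfold Pre_hide_zero_width; infer_instance

def pvWitness_hide_zero_width : String × String := ("a b c d e f g h i", "a")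

def Spec_hide_zero_width (cover_text : String) (secret : String) (out : String) : Prop := out = hide_zero_width_alt cover_text secret
instance (cover_text : String) (secret : String) (out : String) : Decidable (Spec_hide_zero_width cover_text secret out) := by unfold Spec_hide_zero_width; infer_instance

-- ===== CLAIM (what is proved, stated in full; the proofs are below) =====
def Claim_equal_hide_zero_width : Prop := ∀ (cover_text : String) (secret : String), Dom_hide_zero_width cover_text secret → Pre_hide_zero_width cover_text secret → Spec_hide_zero_width cover_text secret (hide_zero_width cover_text secret)

-- ===== LEMMAS AND PROOFS =====

-- the common denotation of both programs: A's char scan, consuming one bit per space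
def scan : List Char → List Char → List Char
  | [], _ => []
  | c :: cs, bits =>
    if c = ' ' then
      match bits with
      | b :: bs => (if b = '0' then [' ', zwChar] else [zwChar, ' ']) ++ scan cs bs
      | [] => ' ' :: scan cs []
    else c :: scan cs bits

-- simple recursive form of splitting on a single space (Python's split(' '))
def splitSp : List Char → List (List Char)
  | [] => [[]]
  | c :: cs =>
    if c = ' ' then [] :: splitSp cs
    else
      match splitSp cs with
      | [] => [[c]]
      | p :: ps => (c :: p) :: ps

lemma splitSp_ne_nil (cs : List Char) : splitSp cs ≠ [] := by
  induction cs with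
  | nil => simp [splitSp]
  | cons c cs ih =>
    simp only [splitSp]
    split
    · simp
    · cases h : splitSp cs <;> simp

lemma splitOn_go_eq (fuel : Nat) : ∀ (l cur : List Char) (acc : List (List Char)),
    l.length < fuel →
    PySem.Chars.splitOn.go [' '] fuel l cur acc
      = acc.reverse ++ (cur.reverse ++ (splitSp l).headD []) :: (splitSp l).tail := by
  induction fuel with
  | zero => intro l cur acc h; omega
  | succ fuel ih =>
    intro l cur acc h
    cases l with
    | nil => simp [PySem.Chars.splitOn.go, splitSp]
    | cons c rest =>
      simp only [PySem.Chars.splitOn.go]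
      by_cases hc : c = ' '
      · subst hc
        have hpre : [' '].isPrefixOf (' ' :: rest) = true := by simp [List.isPrefixOf]
        rw [if_pos hpre]
        simp only [List.length_cons] at h
        have hdr : List.drop [' '].length (' ' :: rest) = rest := rfl
        rw [hdr, ih rest [] (cur.reverse :: acc) (by omega)]
        simp [splitSp]
        cases hsp : splitSp rest with
        | nil => exact absurd hsp (splitSp_ne_nil rest)
        | cons p ps => simp
      · have hpre : [' '].isPrefixOf (c :: rest) = false := by
          simp [List.isPrefixOf]; exact fun hh => hc hh.symm
        rw [if_neg (by simp [hpre])]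
        simp only [List.length_cons] at h
        rw [ih rest (c :: cur) acc (by omega)]
        simp only [splitSp, if_neg hc]
        cases hsp : splitSp rest with
        | nil => exact absurd hsp (splitSp_ne_nil rest)
        | cons p ps => simp

lemma splitOn_eq_splitSp (cs : List Char) :
    PySem.Chars.splitOn cs [' '] = splitSp cs := by
  unfold PySem.Chars.splitOn
  rw [splitOn_go_eq (cs.length + 1) cs [] [] (by omega)]
  cases h : splitSp cs with
  | nil => exact absurd h (splitSp_ne_nil cs)
  | cons p ps => simp

-- B's rejoin of the split equals A's scan
lemma scan_eq_joinB (cs : List Char) : ∀ bits : List Char,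
    scan cs bits = (splitSp cs).headD [] ++ joinB (splitSp cs).tail bits := by
  induction cs with
  | nil => intro bits; cases bits <;> simp [scan, splitSp, joinB]
  | cons c cs ih =>
    intro bits
    by_cases hc : c = ' '
    · subst hc
      simp only [splitSp, List.headD, List.tail]
      cases hsp : splitSp cs with
      | nil => exact absurd hsp (splitSp_ne_nil cs)
      | cons p ps =>
        cases bits with
        | nil =>
          simp only [scan]
          rw [ih []]
          simp [hsp, joinB]
        | cons b bs =>
          simp only [scan]
          rw [ih bs]
          simp [hsp, joinB, List.append_assoc]
    · simp only [splitSp, if_neg hc]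
      cases hsp : splitSp cs with
      | nil => exact absurd hsp (splitSp_ne_nil cs)
      | cons p ps =>
        simp only [scan, if_neg hc, List.headD, List.tail]
        rw [ih bits]
        simp [hsp]

-- A's fold equals scan (invariant over the remaining bits)
lemma foldl_eq_scan (bits : List Char) (cs : List Char) :
    ∀ (acc : List (List Char)) (bi : Nat),
    ((cs.foldl
      (fun (st : List (List Char) × Nat) ch =>
        if ch = ' ' ∧ st.2 < bits.length then
          ((if bits.getD st.2 ' ' = '0' then [' ', zwChar] else [zwChar, ' ']) :: st.1, st.2 + 1)
        else ([ch] :: st.1, st.2))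
      (acc, bi)).1).reverse.flatten
      = acc.reverse.flatten ++ scan cs (bits.drop bi) := by
  induction cs with
  | nil => intro acc bi; simp [scan]
  | cons c cs ih =>
    intro acc bi
    simp only [List.foldl_cons]
    by_cases hcond : c = ' ' ∧ bi < bits.length
    · obtain ⟨hc, hbi⟩ := hcond
      subst hc
      rw [if_pos ⟨rfl, hbi⟩]
      rw [ih]
      have hdrop : bits.drop bi = bits[bi] :: bits.drop (bi + 1) :=
        List.drop_eq_getElem_cons hbi
      have hgd : bits.getD bi ' ' = bits[bi] := List.getD_eq_getElem bits ' ' hbi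
      rw [hdrop]
      simp [scan, List.getElem?_eq_getElem hbi]
    · rw [if_neg hcond]
      rw [ih]
      by_cases hc : c = ' '
      · subst hc
        have hbi : ¬ bi < bits.length := fun hh => hcond ⟨rfl, hh⟩
        have hdrop : bits.drop bi = [] := List.drop_eq_nil_of_le (by omega)
        simp [hdrop, scan]
      · simp [scan, hc]

lemma hide_zero_width_eq_scan (cover_text secret : String) :
    hide_zero_width cover_text secret
      = String.ofList (scan cover_text.toList (text_to_bits secret)) := by
  simp only [hide_zero_width]
  rw [foldl_eq_scan (text_to_bits secret) cover_text.toList [] 0]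
  simp

lemma hide_zero_width_alt_eq_scan (cover_text secret : String) :
    hide_zero_width_alt cover_text secret
      = String.ofList (scan cover_text.toList (text_to_bits secret)) := by
  simp only [hide_zero_width_alt]
  rw [splitOn_eq_splitSp, scan_eq_joinB]

-- ===== VERDICT (by name: the statement is the Claim_ definition above) =====
theorem hide_zero_width_spec : Claim_equal_hide_zero_width := by
  intro cover_text secret _ _
  unfold Spec_hide_zero_width
  rw [hide_zero_width_eq_scan, hide_zero_width_alt_eq_scan]
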